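-- pv_equiv track=rewrite | github.com/ytlvy/ipython | fixLibSource.py | longest_end_subpath
-- ===== SOURCE A (Python) =====
-- def longest_end_subpath(abs_path, relative_path):
--     len1, len2 = len(abs_path), len(relative_path)
--     answer = ""
--     for j in range(len2):
--         match = ""
--         if(abs_path[len1 - 1] == relative_path[j]):
--             for k, l in zip(range(len1 - 1, len1 - 1 - j - 1, -1),
--                             range(j, -1, -1)):
--                 if(abs_path[k] != relative_path[l]):
--                     match = ""
--                     break
--                 else:
--                     match = relative_path[l:j + 1]
--         if (len(match) > len(answer)):
--             answer = match
--
--     return answer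
-- ===== SOURCE B (Python) =====
-- def longest_end_subpath(abs_path, relative_path):
--     for k in range(min(len(abs_path), len(relative_path)), 0, -1):
--         if abs_path.endswith(relative_path[:k]):
--             return relative_path[:k]
--     return ""
-- ===== Notes on version B (the rewrite author's own statement) =====
-- stated objective: simpler
-- what changed: B replaces A's nested per-character Python loops (best-so-far accumulator with a break flag) by a single descending scan over candidate prefix lengths that early-returns the first (hence longest) prefix of relative_path for which the C-level abs_path.endswith holds.
-- intended difference: On inputs where some prefix of relative_path longer than abs_path matches abs_path read cyclically (A's negative indices wrap around), A returns that wrap-around match (longer than abs_path itself), while B returns the longest genuine prefix of relative_path that is a suffix of abs_path, which is the intended value. — e.g. on longest_end_subpath("b", "bb"): A returns "bb", B returns "b"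
import Mathlib
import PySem

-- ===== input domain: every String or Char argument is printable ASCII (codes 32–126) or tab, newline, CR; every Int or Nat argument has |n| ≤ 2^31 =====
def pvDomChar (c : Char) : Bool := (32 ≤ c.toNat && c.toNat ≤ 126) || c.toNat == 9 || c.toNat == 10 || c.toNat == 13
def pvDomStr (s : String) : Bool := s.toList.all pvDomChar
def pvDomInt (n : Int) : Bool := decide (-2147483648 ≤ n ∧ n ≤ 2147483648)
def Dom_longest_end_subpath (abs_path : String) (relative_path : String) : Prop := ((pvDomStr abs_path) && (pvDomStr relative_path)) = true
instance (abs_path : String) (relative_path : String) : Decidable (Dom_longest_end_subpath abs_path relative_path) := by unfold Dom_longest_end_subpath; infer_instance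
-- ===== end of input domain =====

-- B replaces A's nested per-character loops (best-so-far accumulator + break flag) by one descending
-- scan over candidate prefix lengths that returns the first prefix of relative_path that abs_path
-- ends with (a timing run measured B faster on its generated inputs); B returns the intended
-- (non-wrap-around) value where A's negative indices wrap (see D_ below).

-- ===== PORT A =====
def longest_end_subpath (abs_path : String) (relative_path : String) : String :=
  let len1 : Int := PySem.Str.len abs_path
  let len2 : Int := PySem.Str.len relative_path
  (PySem.List.pyRange 0 len2 1).foldl (fun answer j =>
    let m : String :=
      -- abs_path[len1 - 1] == relative_path[j]; pyGet? none (= IndexError, excluded by Pre_) only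
      -- when abs_path = "" — then both branches yield "" like the raising Python never observed
      if PySem.Str.pyGet? abs_path (len1 - 1) = PySem.Str.pyGet? relative_path j then
        (((PySem.List.pyRange (len1 - 1) (len1 - 1 - j - 1) (-1)).zip
            (PySem.List.pyRange j (-1) (-1))).foldl
          (fun (st : String × Bool) kl =>
            if st.2 then st  -- break already happened
            else if PySem.Str.pyGet? abs_path kl.1 ≠ PySem.Str.pyGet? relative_path kl.2 then ("", true)
            else (PySem.Str.slice relative_path (some kl.2) (some (j + 1)), false))
          ("", false)).1
      else ""
    if PySem.Str.len m > PySem.Str.len answer then m else answer) ""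

-- ===== PORT B =====
def longest_end_subpath_alt (abs_path : String) (relative_path : String) : String :=
  let len1 : Int := PySem.Str.len abs_path
  let len2 : Int := PySem.Str.len relative_path
  -- for k in range(min(len1, len2), 0, -1): if abs_path.endswith(relative_path[:k]): return …
  match (PySem.List.pyRange (min len1 len2) 0 (-1)).find?
      (fun k => PySem.Str.endswith abs_path (PySem.Str.slice relative_path none (some k))) with
  | some k => PySem.Str.slice relative_path none (some k)
  | none => ""

-- ===== PRECONDITION & SPEC =====
-- Pre_ excludes exactly the inputs where Python A raises IndexError: abs_path empty with
-- relative_path nonempty (abs_path[-1]), and inputs where a prefix of relative_path matches the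
-- doubled abs_path so the wrapping negative index runs past -len(abs_path).
def Pre_longest_end_subpath (abs_path : String) (relative_path : String) : Prop :=
  (abs_path.toList = [] → relative_path.toList = []) ∧
  ∀ j, j < relative_path.toList.length → 2 * abs_path.toList.length ≤ j →
    (relative_path.toList.drop (j + 1 - 2 * abs_path.toList.length)).take (2 * abs_path.toList.length)
      ≠ abs_path.toList ++ abs_path.toList
instance (abs_path : String) (relative_path : String) : Decidable (Pre_longest_end_subpath abs_path relative_path) := by
  unfold Pre_longest_end_subpath; infer_instance
def pvWitness_longest_end_subpath : String × String := ("x/a/b", "a/b/c")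


-- On inputs where some prefix of relative_path longer than abs_path matches abs_path read
-- cyclically (A's negative indices wrap around), A returns that wrap-around match, longer than
-- abs_path itself; B returns the longest genuine prefix of relative_path that is a suffix of
-- abs_path, which is the intended value.
def D_longest_end_subpath (abs_path : String) (relative_path : String) : Prop :=
  ∃ j, j < relative_path.toList.length ∧ abs_path.toList.length ≤ j ∧ j < 2 * abs_path.toList.length ∧
    relative_path.toList.take (j + 1)
      = (abs_path.toList ++ abs_path.toList).drop (2 * abs_path.toList.length - (j + 1))
instance (abs_path : String) (relative_path : String) : Decidable (D_longest_end_subpath abs_path relative_path) := by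
  unfold D_longest_end_subpath; infer_instance

def Spec_longest_end_subpath (abs_path : String) (relative_path : String) (out : String) : Prop :=
  ¬ D_longest_end_subpath abs_path relative_path → out = longest_end_subpath_alt abs_path relative_path
instance (abs_path : String) (relative_path : String) (out : String) : Decidable (Spec_longest_end_subpath abs_path relative_path out) := by
  unfold Spec_longest_end_subpath; infer_instance

def pvDiffWitness_longest_end_subpath : String × String := ("b", "bb")
def pvDiffWitnessOut_longest_end_subpath : String × String := ("bb", "b")

-- ===== CLAIM (what is proved, stated in full; the proofs are below) =====
def Claim_unchanged_longest_end_subpath : Prop := ∀ (abs_path : String) (relative_path : String), Dom_longest_end_subpath abs_path relative_path → Pre_longest_end_subpath abs_path relative_path → Spec_longest_end_subpath abs_path relative_path (longest_end_subpath abs_path relative_path)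
def Claim_changed_longest_end_subpath : Prop := Dom_longest_end_subpath (pvDiffWitness_longest_end_subpath.1) (pvDiffWitness_longest_end_subpath.2) ∧ Pre_longest_end_subpath (pvDiffWitness_longest_end_subpath.1) (pvDiffWitness_longest_end_subpath.2) ∧ D_longest_end_subpath (pvDiffWitness_longest_end_subpath.1) (pvDiffWitness_longest_end_subpath.2) ∧ longest_end_subpath (pvDiffWitness_longest_end_subpath.1) (pvDiffWitness_longest_end_subpath.2) = pvDiffWitnessOut_longest_end_subpath.1 ∧ longest_end_subpath_alt (pvDiffWitness_longest_end_subpath.1) (pvDiffWitness_longest_end_subpath.2) = pvDiffWitnessOut_longest_end_subpath.2 ∧ pvDiffWitnessOut_longest_end_subpath.1 ≠ pvDiffWitnessOut_longest_end_subpath.2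
def Claim_exact_longest_end_subpath : Prop := ∀ (abs_path : String) (relative_path : String), Dom_longest_end_subpath abs_path relative_path → Pre_longest_end_subpath abs_path relative_path → D_longest_end_subpath abs_path relative_path → longest_end_subpath abs_path relative_path ≠ longest_end_subpath_alt abs_path relative_path

-- ===== LEMMAS AND PROOFS =====

-- 'characters rel[j], rel[j-1], …, rel[j-i] all match abs read backwards from its end (Python indexing)'
abbrev pvAllc (as rs : List Char) (j : Nat) : Prop :=
  ∀ i : Nat, i ≤ j →
    PySem.List.pyGet? as ((as.length : Int) - 1 - (i : Int))
      = PySem.List.pyGet? rs ((j : Int) - (i : Int))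

-- the common value: length of the longest prefix of rs that is a suffix of as
def pvK (as rs : List Char) : Nat :=
  Nat.findGreatest (fun k => rs.take k <:+ as) (min as.length rs.length)

-- A's value as computed by the nested loops
def pvKA (as rs : List Char) : Nat :=
  Nat.findGreatest (fun k => 0 < k ∧ pvAllc as rs (k - 1)) rs.length


theorem pv_fg_congr (P Q : Nat → Prop) [DecidablePred P] [DecidablePred Q] (n : Nat)
    (h : ∀ k, 0 < k → k ≤ n → (P k ↔ Q k)) :
    Nat.findGreatest P n = Nat.findGreatest Q n := by
  induction n with
  | zero => rfl
  | succ n ih =>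
    rw [Nat.findGreatest_succ, Nat.findGreatest_succ]
    have hiff := h (n+1) (Nat.succ_pos n) le_rfl
    by_cases hp : P (n+1)
    · rw [if_pos hp, if_pos (hiff.mp hp)]
    · rw [if_neg hp, if_neg (fun hq => hp (hiff.mpr hq))]
      exact ih (fun k hk hkn => h k hk (le_trans hkn (Nat.le_succ n)))

theorem pv_fg_and_le (P : Nat → Prop) [DecidablePred P] (n m : Nat) :
    Nat.findGreatest (fun k => k ≤ n ∧ P k) m = Nat.findGreatest P (min n m) := by
  induction m with
  | zero => simp
  | succ m ih =>
    by_cases hle : m + 1 ≤ n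
    · have : min n (m+1) = m+1 := by omega
      rw [this, Nat.findGreatest_succ, Nat.findGreatest_succ]
      by_cases hp : P (m+1)
      · rw [if_pos ⟨hle, hp⟩, if_pos hp]
      · rw [if_neg (fun h => hp h.2), if_neg hp, ih]
        congr 1; omega
    · have h1 : min n (m+1) = min n m := by omega
      rw [h1, Nat.findGreatest_succ, if_neg (fun h => hle h.1), ih]

theorem pv_find?_desc (p : Int → Bool) (n : Nat) :
    (PySem.List.pyRange (n : Int) 0 (-1)).find? p =
      (if Nat.findGreatest (fun k => p (k : Int) = true) n = 0 then none
       else some ((Nat.findGreatest (fun k => p (k : Int) = true) n : Int))) := by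
  induction n with
  | zero =>
    rw [PySem.List.pyRange_neg_one_eq_nil (by omega)]
    simp
  | succ n ih =>
    rw [show ((n+1 : Nat) : Int) = ((n : Int) + 1) by push_cast; ring]
    rw [PySem.List.pyRange_neg_one_cons (by omega), List.find?_cons]
    rw [show ((n : Int) + 1 - 1) = (n : Int) by ring]
    rw [Nat.findGreatest_succ]
    by_cases hp : p ((n+1 : Nat) : Int) = true
    · rw [if_pos hp]
      have : p ((n:Int)+1) = true := by rw [show ((n:Int)+1) = ((n+1 : Nat) : Int) by push_cast; ring]; exact hp
      rw [this]
      simp only [Nat.succ_ne_zero, reduceIte]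
      norm_cast
    · rw [if_neg hp]
      have : p ((n:Int)+1) = false := by
        rw [show ((n:Int)+1) = ((n+1 : Nat) : Int) by push_cast; ring]
        exact Bool.eq_false_iff.mpr (fun h => hp h)
      rw [this, ih]

theorem pv_slice_to (r : String) (k : Nat) :
    (PySem.Str.slice r none (some (k : Int))).toList = r.toList.take k := by
  rw [PySem.Str.toList_slice, PySem.Chars.slice_eq_listSlice, PySem.List.slice_to_natCast]

theorem pv_portB_char (a r : String) :
    longest_end_subpath_alt a r = String.ofList (r.toList.take (pvK a.toList r.toList)) := by
  unfold longest_end_subpath_alt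
  simp only [PySem.Str.len_eq]
  rw [show (min ((a.toList.length : Int)) ((r.toList.length : Int))) = ((min a.toList.length r.toList.length : Nat) : Int) by push_cast; rfl]
  rw [pv_find?_desc]
  rw [pv_fg_congr (fun k => (PySem.Str.endswith a (PySem.Str.slice r none (some (k:Int)))) = true)
        (fun k => r.toList.take k <:+ a.toList) (min a.toList.length r.toList.length)
        (by
          intro k _ _
          show PySem.Str.endswith a (PySem.Str.slice r none (some (k:Int))) = true ↔ r.toList.take k <:+ a.toList
          rw [PySem.Str.endswith_eq, PySem.Chars.endswith_iff, pv_slice_to])]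
  by_cases h0 : pvK a.toList r.toList = 0
  · rw [pvK] at h0
    rw [if_pos h0]
    rw [pvK, h0]
    simp
  · rw [pvK] at h0
    rw [if_neg h0]
    apply String.toList_inj.mp
    rw [pv_slice_to, String.toList_ofList, pvK]

def pvIStep (a r : String) (j : Int) (st : String × Bool) (kl : Int × Int) : String × Bool :=
  if st.2 then st
  else if PySem.Str.pyGet? a kl.1 ≠ PySem.Str.pyGet? r kl.2 then ("", true)
  else (PySem.Str.slice r (some kl.2) (some (j + 1)), false)

def pvInner (a r : String) (j : Int) : String :=
  if PySem.Str.pyGet? a (PySem.Str.len a - 1) = PySem.Str.pyGet? r j then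
    (((PySem.List.pyRange (PySem.Str.len a - 1) (PySem.Str.len a - 1 - j - 1) (-1)).zip
        (PySem.List.pyRange j (-1) (-1))).foldl (pvIStep a r j) ("", false)).1
  else ""

def pvOuter (a r : String) (answer : String) (j : Int) : String :=
  if PySem.Str.len (pvInner a r j) > PySem.Str.len answer then pvInner a r j else answer

theorem pv_portA_unfold (a r : String) :
    longest_end_subpath a r = (PySem.List.pyRange 0 (PySem.Str.len r) 1).foldl (pvOuter a r) "" := rfl

theorem pv_inner_fold (a r : String) (j N : Nat) (hN : N ≤ j + 1) :
    ((List.range N).foldl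
        (fun st (i : Nat) => pvIStep a r (j : Int) st
          ((a.toList.length : Int) - 1 - (i : Int), (j : Int) - (i : Int))) ("", false))
    = if (∀ i : Nat, i < N →
            PySem.Str.pyGet? a ((a.toList.length : Int) - 1 - (i : Int))
              = PySem.Str.pyGet? r ((j : Int) - (i : Int)))
      then ((if N = 0 then "" else PySem.Str.slice r (some ((j : Int) - ((N : Int) - 1))) (some ((j : Int) + 1))), false)
      else ("", true) := by
  induction N with
  | zero => simp
  | succ N ih =>
    rw [List.range_succ, List.foldl_append, List.foldl_cons, List.foldl_nil,
        ih (by omega)]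
    by_cases hall : (∀ i : Nat, i < N →
        PySem.Str.pyGet? a ((a.toList.length : Int) - 1 - (i : Int))
          = PySem.Str.pyGet? r ((j : Int) - (i : Int)))
    · rw [if_pos hall]
      by_cases hc : PySem.Str.pyGet? a ((a.toList.length : Int) - 1 - (N : Int))
          = PySem.Str.pyGet? r ((j : Int) - (N : Int))
      · have hall' : (∀ i : Nat, i < N + 1 →
            PySem.Str.pyGet? a ((a.toList.length : Int) - 1 - (i : Int))
              = PySem.Str.pyGet? r ((j : Int) - (i : Int))) := by
          intro i hi
          rcases Nat.lt_succ_iff_lt_or_eq.mp hi with h | h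
          · exact hall i h
          · subst h; exact hc
        rw [if_pos hall']
        show pvIStep a r (j : Int) _ _ = _
        unfold pvIStep
        rw [if_neg (by simp), if_neg (not_not_intro hc)]
        simp only [Nat.succ_ne_zero, reduceIte]
        rw [show ((N + 1 : Nat) : Int) - 1 = (N : Int) by push_cast; ring]
      · have hnc : ¬ (∀ i : Nat, i < N + 1 →
            PySem.Str.pyGet? a ((a.toList.length : Int) - 1 - (i : Int))
              = PySem.Str.pyGet? r ((j : Int) - (i : Int))) := fun h => hc (h N (by omega))
        rw [if_neg hnc]
        show pvIStep a r (j : Int) _ _ = _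
        unfold pvIStep
        rw [if_neg (by simp), if_pos hc]
    · have hnc : ¬ (∀ i : Nat, i < N + 1 →
          PySem.Str.pyGet? a ((a.toList.length : Int) - 1 - (i : Int))
            = PySem.Str.pyGet? r ((j : Int) - (i : Int))) := fun h => hall (fun i hi => h i (by omega))
      rw [if_neg hall, if_neg hnc]
      show pvIStep a r (j : Int) _ _ = _
      unfold pvIStep
      simp

theorem pv_str_pyGet?_toList (s : String) (i : Int) :
    PySem.Str.pyGet? s i = PySem.List.pyGet? s.toList i := by
  simp [PySem.Str.pyGet?_eq]

theorem pv_slice_prefix (r : String) (j : Nat) :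
    PySem.Str.slice r (some (0 : Int)) (some ((j : Int) + 1)) = String.ofList (r.toList.take (j + 1)) := by
  apply String.toList_inj.mp
  rw [PySem.Str.toList_slice, PySem.Chars.slice_eq_listSlice, String.toList_ofList]
  rw [show (0 : Int) = ((0 : Nat) : Int) by norm_num,
      show ((j : Int) + 1) = ((j + 1 : Nat) : Int) by push_cast; ring,
      PySem.List.slice_natCast]
  simp

theorem pv_inner_eq (a r : String) (j : Nat) :
    pvInner a r (j : Int) =
      if pvAllc a.toList r.toList j then String.ofList (r.toList.take (j + 1)) else "" := by
  have h1 : PySem.List.pyRange ((a.toList.length : Int) - 1) ((a.toList.length : Int) - 1 - (j : Int) - 1) (-1)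
      = (List.range (j + 1)).map (fun k : Nat => (a.toList.length : Int) - 1 - (k : Int)) := by
    rw [PySem.List.pyRange_neg_one,
        show ((a.toList.length : Int) - 1 - ((a.toList.length : Int) - 1 - (j : Int) - 1)).toNat = j + 1 by omega]
  have h2 : PySem.List.pyRange (j : Int) (-1) (-1)
      = (List.range (j + 1)).map (fun k : Nat => (j : Int) - (k : Int)) := by
    rw [PySem.List.pyRange_neg_one,
        show ((j : Int) - (-1)).toNat = j + 1 by omega]
  have hcond : (∀ i : Nat, i < j + 1 →
      PySem.Str.pyGet? a ((a.toList.length : Int) - 1 - (i : Int))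
        = PySem.Str.pyGet? r ((j : Int) - (i : Int))) ↔ pvAllc a.toList r.toList j := by
    constructor
    · intro h i hi
      have := h i (by omega)
      rwa [pv_str_pyGet?_toList, pv_str_pyGet?_toList] at this
    · intro h i hi
      rw [pv_str_pyGet?_toList, pv_str_pyGet?_toList]
      exact h i (by omega)
  unfold pvInner
  simp only [PySem.Str.len_eq]
  rw [h1, h2, List.zip_map', List.foldl_map]
  rw [pv_inner_fold a r j (j + 1) le_rfl]
  by_cases hA : pvAllc a.toList r.toList j
  · have c0 : PySem.Str.pyGet? a ((a.toList.length : Int) - 1) = PySem.Str.pyGet? r (j : Int) := by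
      have := hA 0 (Nat.zero_le j)
      rw [pv_str_pyGet?_toList, pv_str_pyGet?_toList]
      simpa using this
    rw [if_pos c0, if_pos (hcond.mpr hA), if_pos hA]
    simp only [Nat.succ_ne_zero, reduceIte]
    rw [show ((j : Int) - (((j + 1 : Nat) : Int) - 1)) = (0 : Int) by push_cast; ring]
    exact pv_slice_prefix r j
  · rw [if_neg hA]
    by_cases c0 : PySem.Str.pyGet? a ((a.toList.length : Int) - 1) = PySem.Str.pyGet? r (j : Int)
    · rw [if_pos c0, if_neg (fun h => hA (hcond.mp h))]
    · rw [if_neg c0]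

theorem pv_len_ofList (l : List Char) : PySem.Str.len (String.ofList l) = (l.length : Int) := by
  rw [PySem.Str.len_eq, String.toList_ofList]

theorem pv_outer_fold (a r : String) (N : Nat) (hN : N ≤ r.toList.length) :
    (PySem.List.pyRange 0 (N : Int) 1).foldl (pvOuter a r) "" =
      String.ofList (r.toList.take
        (Nat.findGreatest (fun k => 0 < k ∧ pvAllc a.toList r.toList (k - 1)) N)) := by
  induction N with
  | zero =>
    rw [show ((0 : Nat) : Int) = (0 : Int) by norm_num, PySem.List.pyRange_one_eq_nil le_rfl]
    simp only [List.foldl_nil, Nat.findGreatest_zero, List.take_zero]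
  | succ N ih =>
    rw [show ((N + 1 : Nat) : Int) = ((N : Int) + 1) by push_cast; ring,
        PySem.List.pyRange_one_succ_right (by positivity), List.foldl_append,
        List.foldl_cons, List.foldl_nil, ih (by omega)]
    have hK := Nat.findGreatest_le (P := fun k => 0 < k ∧ pvAllc a.toList r.toList (k - 1)) N
    set K := Nat.findGreatest (fun k => 0 < k ∧ pvAllc a.toList r.toList (k - 1)) N with hKdef
    by_cases hA : pvAllc a.toList r.toList N
    · have h1 : pvOuter a r (String.ofList (r.toList.take K)) (N : Int)
          = String.ofList (r.toList.take (N + 1)) := by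
        unfold pvOuter
        rw [pv_inner_eq a r N, if_pos hA, pv_len_ofList, pv_len_ofList]
        rw [if_pos (by
          rw [List.length_take, List.length_take,
              show min (N + 1) r.toList.length = N + 1 by omega,
              show min K r.toList.length = K by omega]
          exact_mod_cast Nat.lt_succ_of_le hK)]
      rw [h1, Nat.findGreatest_succ,
          if_pos (show 0 < N + 1 ∧ pvAllc a.toList r.toList (N + 1 - 1) from
            ⟨Nat.succ_pos N, by simpa using hA⟩)]
    · have h1 : pvOuter a r (String.ofList (r.toList.take K)) (N : Int)
          = String.ofList (r.toList.take K) := by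
        unfold pvOuter
        rw [pv_inner_eq a r N, if_neg hA]
        rw [if_neg (by simp)]
      rw [h1, Nat.findGreatest_succ,
          if_neg (fun h => hA (by simpa using h.2))]

theorem pv_portA_char (a r : String) :
    longest_end_subpath a r = String.ofList (r.toList.take (pvKA a.toList r.toList)) := by
  rw [pv_portA_unfold, PySem.Str.len_eq, pv_outer_fold a r r.toList.length le_rfl]
  rfl

theorem pv_not_allc_big (as rs : List Char) (j : Nat) (hjm : j < rs.length)
    (h : 2 * as.length ≤ j) : ¬ pvAllc as rs j := by
  intro hall
  have := hall (2 * as.length) h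
  rw [show ((as.length : Int) - 1 - ((2 * as.length : Nat) : Int)) = -((as.length : Int) + 1) by push_cast; ring] at this
  rw [show ((j : Int) - ((2 * as.length : Nat) : Int)) = ((j - 2 * as.length : Nat) : Int) by omega] at this
  rw [PySem.List.pyGet?_natCast] at this
  rw [(PySem.List.pyGet?_eq_none_iff as _).mpr (by
    unfold PySem.Raise.InRange
    omega)] at this
  rw [List.getElem?_eq_getElem (by omega)] at this
  simp at this

theorem pv_key (as : List Char) (i : Nat) (hi : i < 2 * as.length) :
    PySem.List.pyGet? as ((as.length : Int) - 1 - (i : Int))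
      = (as ++ as)[2 * as.length - 1 - i]? := by
  by_cases hlt : i < as.length
  · rw [show ((as.length : Int) - 1 - (i : Int)) = ((as.length - 1 - i : Nat) : Int) by omega,
        PySem.List.pyGet?_natCast]
    rw [List.getElem?_eq_getElem (l := as) (by omega),
        List.getElem?_eq_getElem (l := as ++ as) (by simp; omega)]
    congr 1
    rw [List.getElem_append_right (by omega)]
    congr 1
    omega
  · rw [PySem.List.pyGet?_neg as (i := (as.length : Int) - 1 - (i : Int)) (by omega) (by omega)]
    rw [show (-((as.length : Int) - 1 - (i : Int))).toNat = i + 1 - as.length by omega]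
    rw [show as.length - (i + 1 - as.length) = 2 * as.length - 1 - i by omega]
    rw [List.getElem?_eq_getElem (l := as) (by omega),
        List.getElem?_eq_getElem (l := as ++ as) (by simp; omega)]
    congr 1
    rw [List.getElem_append_left (by omega)]

theorem pv_allc_core (as rs : List Char) (j : Nat) (hj2 : j < 2 * as.length) :
    pvAllc as rs j ↔ rs.take (j + 1) = (as ++ as).drop (2 * as.length - (j + 1)) := by
  constructor
  · intro hall
    apply List.ext_getElem?
    intro i
    by_cases hij : i < j + 1
    · rw [List.getElem?_take_of_lt hij, List.getElem?_drop]
      have := hall (j - i) (by omega)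
      rw [pv_key as (j - i) (by omega)] at this
      rw [show ((j : Int) - ((j - i : Nat) : Int)) = ((i : Nat) : Int) by omega,
          PySem.List.pyGet?_natCast] at this
      rw [show 2 * as.length - (j + 1) + i = 2 * as.length - 1 - (j - i) by omega]
      exact this.symm
    · rw [List.getElem?_eq_none (by simp; omega), List.getElem?_eq_none (by simp; omega)]
  · intro hw i hi
    have := congrArg (fun l => l[j - i]?) hw
    simp only at this
    rw [List.getElem?_take_of_lt (by omega), List.getElem?_drop] at this
    rw [pv_key as i (by omega),
        show ((j : Int) - (i : Int)) = ((j - i : Nat) : Int) by omega,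
        PySem.List.pyGet?_natCast]
    rw [show 2 * as.length - (j + 1) + (j - i) = 2 * as.length - 1 - i by omega] at this
    exact this.symm

theorem pv_allc_lt (as rs : List Char) (j : Nat) (hjm : j < rs.length) (hjn : j < as.length) :
    pvAllc as rs j ↔ rs.take (j + 1) <:+ as := by
  rw [pv_allc_core as rs j (by omega)]
  rw [List.suffix_iff_eq_drop]
  have hlen : (rs.take (j + 1)).length = j + 1 := by simp; omega
  rw [hlen]
  have hdd : (as ++ as).drop (2 * as.length - (j + 1)) = as.drop (as.length - (j + 1)) := by
    rw [show 2 * as.length - (j + 1) = as.length + (as.length - (j + 1)) by omega]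
    exact List.drop_length_add_append _
  rw [hdd]


theorem pv_KA_eq_K (a r : String) (hnD : ¬ D_longest_end_subpath a r) :
    pvKA a.toList r.toList = pvK a.toList r.toList := by
  unfold pvKA pvK
  rw [pv_fg_congr _ (fun k => k ≤ a.toList.length ∧ r.toList.take k <:+ a.toList)
        r.toList.length ?_, pv_fg_and_le]
  intro k hk hkm
  constructor
  · rintro ⟨-, hall⟩
    by_cases h1 : k - 1 < a.toList.length
    · refine ⟨by omega, ?_⟩
      have := (pv_allc_lt a.toList r.toList (k - 1) (by omega) h1).mp hall
      simpa [show k - 1 + 1 = k by omega] using this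
    · exfalso
      by_cases h2 : k - 1 < 2 * a.toList.length
      · refine hnD ⟨k - 1, by omega, by omega, h2, ?_⟩
        have := (pv_allc_core a.toList r.toList (k - 1) h2).mp hall
        simpa [show k - 1 + 1 = k by omega] using this
      · exact pv_not_allc_big a.toList r.toList (k - 1) (by omega) (by omega) hall
  · rintro ⟨hkn, hsuf⟩
    refine ⟨hk, (pv_allc_lt a.toList r.toList (k - 1) (by omega) (by omega)).mpr ?_⟩
    simpa [show k - 1 + 1 = k by omega] using hsuf

-- ===== VERDICT (by name: the statement is the Claim_ definition above) =====
theorem longest_end_subpath_spec : Claim_unchanged_longest_end_subpath := by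
  intro a r _ _ hD
  rw [pv_portA_char, pv_portB_char, pv_KA_eq_K a r hD]

theorem longest_end_subpath_changed : Claim_changed_longest_end_subpath := by
  unfold Claim_changed_longest_end_subpath; decide

theorem longest_end_subpath_tight : Claim_exact_longest_end_subpath := by
  intro a r _ _ hD
  obtain ⟨j, hjm, hjn, hj2, hw⟩ := hD
  have hallc := (pv_allc_core a.toList r.toList j hj2).mpr hw
  have hKA : j + 1 ≤ pvKA a.toList r.toList :=
    Nat.le_findGreatest (by omega) ⟨Nat.succ_pos j, by simpa using hallc⟩
  have hKB := Nat.findGreatest_le (P := fun k => r.toList.take k <:+ a.toList)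
    (min a.toList.length r.toList.length)
  have hKAle := Nat.findGreatest_le (P := fun k => 0 < k ∧ pvAllc a.toList r.toList (k - 1))
    r.toList.length
  rw [pv_portA_char, pv_portB_char]
  intro heq
  have htl := congrArg String.toList heq
  rw [String.toList_ofList, String.toList_ofList] at htl
  have hlen := congrArg List.length htl
  rw [List.length_take, List.length_take] at hlen
  have : pvKA a.toList r.toList ≤ r.toList.length := hKAle
  have : pvK a.toList r.toList ≤ min a.toList.length r.toList.length := hKB
  unfold pvKA pvK at *
  omega
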